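-- pv_equiv track=rewrite | github.com/murbar/code-challenges | leetcode/subsets.py | subsets3
-- ===== SOURCE A (Python) =====
-- from typing import List
--
-- def subsets3(nums: List[int]) -> List[List[int]]:
--     # recursive backtracking
--     def backtrack(first=0, curr=[]):
--         # if the combination is done
--         if len(curr) == k:
--             output.append(curr[:])
--         for i in range(first, n):
--             # similar here to array permutations problem
--             # add nums[i] into the current combination
--             curr.append(nums[i])
--             # use next integers to complete the combination
--             backtrack(i + 1, curr)
--             # backtrack
--             curr.pop()
--
--     output = []
--     n = len(nums)
--     for k in range(n + 1):
--         backtrack()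
--
--     return output
-- ===== SOURCE B (Python) =====
-- from typing import List
--
-- def subsets3(nums: List[int]) -> List[List[int]]:
--     # suffix DP: groups[k] = all size-k subsets of the current suffix, in lex order
--     groups = [[[]]]
--     for x in reversed(nums):
--         tails = groups[1:] + [[]]
--         groups = [[[]]] + [[[x] + s for s in prev] + nxt
--                            for prev, nxt in zip(groups, tails)]
--     out = []
--     for g in groups:
--         out.extend(g)
--     return out
-- ===== Notes on version B (the rewrite author's own statement) =====
-- stated objective: alternative
-- what changed: A runs a full recursive DFS over all 2^n subsets once for every target size k=0..n, keeping only size-k ones each pass; B does one right-to-left DP pass that maintains, per size k, the list of k-subsets of the current suffix in lex order, then concatenates the buckets.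
import Mathlib
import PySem

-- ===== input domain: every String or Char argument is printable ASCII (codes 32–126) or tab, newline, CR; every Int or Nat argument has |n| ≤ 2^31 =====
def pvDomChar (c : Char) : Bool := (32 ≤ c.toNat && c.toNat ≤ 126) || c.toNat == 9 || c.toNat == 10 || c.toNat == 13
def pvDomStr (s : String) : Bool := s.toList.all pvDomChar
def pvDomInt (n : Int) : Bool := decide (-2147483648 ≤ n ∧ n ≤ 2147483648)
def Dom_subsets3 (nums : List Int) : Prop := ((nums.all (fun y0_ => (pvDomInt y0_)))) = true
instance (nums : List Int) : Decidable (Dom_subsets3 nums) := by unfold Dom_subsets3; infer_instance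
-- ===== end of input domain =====

-- B changes the algorithm: one right-to-left DP pass bucketing subsets by size, instead of
-- A's (n+1) full DFS passes (one per target size).

-- ===== PORT A =====
-- backtrack(first, curr): the `for i in range(first, n)` loop walks the suffix nums[first:]
-- left to right; `suf` is that suffix, so `curr.append(nums[i]); backtrack(i+1, curr); curr.pop()`
-- becomes a call on (curr ++ [x]) with the rest of the suffix.
mutual
def btkA (k : Nat) (curr suf : List Int) (out : List (List Int)) : List (List Int) :=
  let out1 := if curr.length = k then out ++ [curr] else out
  btkForA k curr suf out1
termination_by (suf.length, 1)

def btkForA (k : Nat) (curr suf : List Int) (out : List (List Int)) : List (List Int) :=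
  match suf with
  | [] => out
  | x :: rest => btkForA k curr rest (btkA k (curr ++ [x]) rest out)
termination_by (suf.length, 0)
end

-- `for k in range(n + 1): backtrack()`; k ranges over 0..n, kept as Nat (n = len(nums) ≥ 0).
def subsets3 (nums : List Int) : List (List Int) :=
  (List.range (nums.length + 1)).foldl (fun out k => btkA k [] nums out) []

-- ===== PORT B =====
-- `groups = [[[]]] + [[[x]+s for s in prev] + nxt for prev, nxt in zip(groups, tails)]`
def bStepB (x : Int) (groups : List (List (List Int))) : List (List (List Int)) :=
  [[]] :: List.zipWith (fun prev nxt => prev.map (fun s => x :: s) ++ nxt)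
            groups (groups.drop 1 ++ [[]])

def subsets3_alt (nums : List Int) : List (List Int) :=
  let groups := nums.reverse.foldl (fun g x => bStepB x g) [[[]]]
  groups.flatten

-- ===== PRECONDITION & SPEC =====
def Spec_subsets3 (nums : List Int) (out : List (List Int)) : Prop := out = subsets3_alt nums
instance (nums : List Int) (out : List (List Int)) : Decidable (Spec_subsets3 nums out) := by unfold Spec_subsets3; infer_instance

-- ===== CLAIM (what is proved, stated in full; the proofs are below) =====
def Claim_equal_subsets3 : Prop := ∀ (nums : List Int), Dom_subsets3 nums → Spec_subsets3 nums (subsets3 nums)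

-- ===== LEMMAS AND PROOFS =====

-- size-k combinations of a list, in lexicographic (index) order: the common specification
def combs : Nat → List Int → List (List Int)
  | 0, _ => [[]]
  | _ + 1, [] => []
  | k + 1, x :: rest => (combs k rest).map (fun s => x :: s) ++ combs (k + 1) rest

theorem combs_eq_nil (k : Nat) (l : List Int) (h : l.length < k) : combs k l = [] := by
  induction l generalizing k with
  | nil => cases k with
    | zero => omega
    | succ k => rfl
  | cons x rest ih =>
    cases k with
    | zero => omega
    | succ k =>
      simp only [combs]
      rw [ih k (by simpa using h), ih (k + 1) (by simp at h ⊢; omega)]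
      simp

-- ---- A-side: btk appends exactly the DFS-ordered subsets of the suffix, filtered by size ----
def allSubsFor (curr : List Int) : List Int → List (List Int)
  | [] => []
  | x :: rest => ((curr ++ [x]) :: allSubsFor (curr ++ [x]) rest) ++ allSubsFor curr rest

def allSubs (curr suf : List Int) : List (List Int) := curr :: allSubsFor curr suf

mutual
theorem btk_eq (k : Nat) (curr suf : List Int) (out : List (List Int)) :
    btkA k curr suf out = out ++ (allSubs curr suf).filter (fun s => s.length = k) := by
  rw [btkA, btkFor_eq]
  simp only [allSubs, List.filter_cons]
  by_cases h : curr.length = k <;> simp [h, List.append_assoc]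
termination_by (suf.length, 1)

theorem btkFor_eq (k : Nat) (curr suf : List Int) (out : List (List Int)) :
    btkForA k curr suf out = out ++ (allSubsFor curr suf).filter (fun s => s.length = k) := by
  match suf with
  | [] => simp [btkForA, allSubsFor]
  | x :: rest =>
    rw [btkForA, btkFor_eq k curr rest, btk_eq k (curr ++ [x]) rest]
    simp only [allSubsFor, allSubs, List.filter_cons, List.filter_append, List.append_assoc,
      List.cons_append, List.length_append, List.length_cons, List.length_nil]
    split_ifs <;> simp
termination_by (suf.length, 0)
end

theorem allSubsFor_filter (suf : List Int) : ∀ (curr : List Int) (k : Nat),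
    (allSubsFor curr suf).filter (fun s => s.length = k) =
      if curr.length < k then (combs (k - curr.length) suf).map (fun s => curr ++ s) else [] := by
  induction suf with
  | nil =>
    intro curr k
    by_cases h : curr.length < k
    · obtain ⟨j, hj⟩ : ∃ j, k - curr.length = j + 1 := ⟨k - curr.length - 1, by omega⟩
      simp [allSubsFor, h, hj, combs]
    · simp [allSubsFor, h]
  | cons x rest ih =>
    intro curr k
    simp only [allSubsFor, List.filter_append, List.filter_cons, ih]
    by_cases h : curr.length < k
    · obtain ⟨j, hj⟩ : ∃ j, k - curr.length = j + 1 := ⟨k - curr.length - 1, by omega⟩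
      rw [hj]
      simp only [combs, List.map_append, List.map_map]
      by_cases h2 : curr.length + 1 < k
      · have h3 : ¬ curr.length + 1 = k := by omega
        have h4 : k - (curr.length + 1) = j := by omega
        simp [h, h2, h3, h4, Function.comp, List.append_assoc]
      · have h5 : curr.length + 1 = k := by omega
        have h6 : j = 0 := by omega
        subst h6
        simp [h, h5, combs, Function.comp]
    · have h2 : ¬ curr.length + 1 < k := by omega
      have h3 : ¬ curr.length + 1 = k := by omega
      simp [h, h2, h3]

theorem allSubs_filter (suf : List Int) (k : Nat) :
    (allSubs [] suf).filter (fun s => s.length = k) = combs k suf := by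
  simp only [allSubs, List.filter_cons, allSubsFor_filter]
  cases k with
  | zero => simp [combs]
  | succ k => simp

theorem subsets3_eq_combs (nums : List Int) :
    subsets3 nums = (List.range (nums.length + 1)).flatMap (fun k => combs k nums) := by
  rw [subsets3]
  rw [show (fun (out : List (List Int)) (k : Nat) => btkA k [] nums out)
        = fun out k => out ++ combs k nums from ?_]
  · exact PySem.List.foldl_append_eq_flatMap _ _ _
  · funext out k
    rw [btk_eq, allSubs_filter]

-- ---- B-side: the fold keeps groups[k] = combs k (current suffix) ----
theorem bStep_spec (x : Int) (l : List Int) :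
    bStepB x ((List.range (l.length + 1)).map (fun k => combs k l)) =
      (List.range (l.length + 1 + 1)).map (fun k => combs k (x :: l)) := by
  apply List.ext_getElem
  · simp [bStepB]
  · intro i h1 h2
    match i with
    | 0 => simp [bStepB, combs]
    | m + 1 =>
      have hm : m < l.length + 1 := by
        simp [bStepB] at h1; omega
      simp only [bStepB, List.getElem_cons_succ, List.getElem_zipWith,
        List.getElem_map, List.getElem_range]
      by_cases hmn : m < l.length
      · rw [List.getElem_append_left (by simp; omega)]
        simp [combs]
      · have hml : m = l.length := by omega
        subst hml
        rw [List.getElem_append_right (by simp)]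
        simp [combs, combs_eq_nil]

theorem groups_spec (nums : List Int) :
    nums.foldr (fun x g => bStepB x g) [[[]]] =
      (List.range (nums.length + 1)).map (fun k => combs k nums) := by
  induction nums with
  | nil => simp [combs]
  | cons x rest ih => rw [List.foldr_cons, ih, bStep_spec]; simp

theorem subsets3_alt_eq_combs (nums : List Int) :
    subsets3_alt nums = (List.range (nums.length + 1)).flatMap (fun k => combs k nums) := by
  rw [subsets3_alt]
  simp only [List.foldl_reverse]
  rw [groups_spec, List.flatMap_def]

-- ===== VERDICT (by name: the statement is the Claim_ definition above) =====
theorem subsets3_spec : Claim_equal_subsets3 := by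
  intro nums _
  unfold Spec_subsets3
  rw [subsets3_eq_combs, subsets3_alt_eq_combs]
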